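-- pv_equiv track=rewrite | github.com/miklafc/primerAnalyzer | primerChecking.py | CheckPrimerContent
-- ===== SOURCE A (Python) =====
-- def CheckPrimerContent(primer):
--     """Checking whether the primer sequences include any illegal characters."""
--     primer = primer.upper()
--     counter = 0;
--     for nuc in primer:
--         if nuc == 'A' or nuc == 'C' or nuc == 'T' or nuc == 'G':
--             counter += 0
--         else:
--             counter += 1
--     return counter
-- ===== SOURCE B (Python) =====
-- def CheckPrimerContent(primer):
--     """Checking whether the primer sequences include any illegal characters."""
--     p = primer.upper()
--     return len(p) - p.count('A') - p.count('C') - p.count('T') - p.count('G')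
-- ===== Notes on version B (the rewrite author's own statement) =====
-- stated objective: faster
-- what changed: B keeps no running counter: it computes the illegal-character count as the complement of the legal ones, len(p) minus four str.count scans, instead of A's per-character Python-level branch loop; the C-implemented str.count scans make it measurably faster.
import Mathlib
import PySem

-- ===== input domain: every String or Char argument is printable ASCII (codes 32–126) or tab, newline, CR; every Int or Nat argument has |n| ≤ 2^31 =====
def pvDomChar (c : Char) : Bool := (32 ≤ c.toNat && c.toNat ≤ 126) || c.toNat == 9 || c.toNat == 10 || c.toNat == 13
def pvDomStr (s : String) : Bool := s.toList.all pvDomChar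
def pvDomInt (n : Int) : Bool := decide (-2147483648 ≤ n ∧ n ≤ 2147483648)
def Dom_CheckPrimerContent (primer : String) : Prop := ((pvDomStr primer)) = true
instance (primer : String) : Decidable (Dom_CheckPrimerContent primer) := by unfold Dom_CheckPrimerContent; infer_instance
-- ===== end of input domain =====

-- B replaces A's branch-per-character counter loop by the complement of the legal counts:
-- len(p) minus four str.count scans (different decomposition; same O(n) cost).


-- ===== PORT A =====
def CheckPrimerContent (primer : String) : Int :=
  let p := PySem.Str.upper primer
  p.toList.foldl
    (fun counter nuc =>
      if nuc == 'A' || nuc == 'C' || nuc == 'T' || nuc == 'G' then counter + 0 else counter + 1)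
    0

-- ===== PORT B =====
def CheckPrimerContent_alt (primer : String) : Int :=
  let p := PySem.Str.upper primer
  (PySem.Str.len p : Int) - (PySem.Str.count p "A" : Int) - (PySem.Str.count p "C" : Int)
    - (PySem.Str.count p "T" : Int) - (PySem.Str.count p "G" : Int)

-- ===== PRECONDITION & SPEC =====
def Spec_CheckPrimerContent (primer : String) (out : Int) : Prop := out = CheckPrimerContent_alt primer
instance (primer : String) (out : Int) : Decidable (Spec_CheckPrimerContent primer out) := by unfold Spec_CheckPrimerContent; infer_instance

-- ===== CLAIM (what is proved, stated in full; the proofs are below) =====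
def Claim_equal_CheckPrimerContent : Prop := ∀ (primer : String), Dom_CheckPrimerContent primer → Spec_CheckPrimerContent primer (CheckPrimerContent primer)

-- ===== LEMMAS AND PROOFS =====

-- Python's s.count(sub) for a one-character sub is the character count.
theorem count_go_single (c : Char) : ∀ (fuel : Nat) (l : List Char) (acc : Nat),
    l.length ≤ fuel → PySem.Chars.count.go [c] fuel l acc = acc + l.count c
  | 0, [], acc, _ => by simp [PySem.Chars.count.go]
  | 0, _ :: _, _, h => by simp at h
  | Nat.succ fuel, [], acc, _ => by simp [PySem.Chars.count.go]
  | Nat.succ fuel, h :: t, acc, hle => by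
      simp only [PySem.Chars.count.go, List.isPrefixOf, Bool.and_true,
        List.length_cons] at *
      by_cases hc : h = c
      · simp only [hc, BEq.rfl, if_pos, List.drop, List.length]
        rw [count_go_single c fuel t (acc + 1) (by omega)]
        simp
        omega
      · have : (c == h) = false := by simp; exact fun e => hc e.symm
        simp only [this, if_neg Bool.false_ne_true]
        rw [count_go_single c fuel t acc (by omega)]
        simp [hc]

theorem chars_count_single (l : List Char) (c : Char) :
    PySem.Chars.count l [c] = l.count c := by
  simp [PySem.Chars.count]
  simpa using count_go_single c l.length l 0 (le_refl _)

-- A's loop with accumulator acc adds the number of illegal characters.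
theorem loop_eq (l : List Char) (acc : Int) :
    l.foldl (fun counter nuc =>
      if nuc == 'A' || nuc == 'C' || nuc == 'T' || nuc == 'G' then counter + 0 else counter + 1) acc
    = acc + (l.countP (fun nuc => !(nuc == 'A' || nuc == 'C' || nuc == 'T' || nuc == 'G')) : Int) := by
  induction l generalizing acc with
  | nil => simp
  | cons x t ih =>
      rw [List.foldl_cons, ih, List.countP_cons]
      by_cases hx : (x == 'A' || x == 'C' || x == 'T' || x == 'G') = true
      · rw [if_pos hx]
        simp [hx]
      · rw [if_neg hx]
        simp only [Bool.not_eq_true] at hx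
        simp [hx]
        omega

-- Complement identity: illegal count = length minus the four legal character counts.
theorem complement_eq (l : List Char) :
    (l.countP (fun nuc => !(nuc == 'A' || nuc == 'C' || nuc == 'T' || nuc == 'G')) : Int)
    = (l.length : Int) - l.count 'A' - l.count 'C' - l.count 'T' - l.count 'G' := by
  induction l with
  | nil => simp
  | cons x t ih =>
      by_cases hA : x = 'A' <;> by_cases hC : x = 'C' <;> by_cases hT : x = 'T' <;>
        by_cases hG : x = 'G' <;>
        simp_all [List.length_cons] <;> omega

-- ===== VERDICT (by name: the statement is the Claim_ definition above) =====
theorem CheckPrimerContent_spec : Claim_equal_CheckPrimerContent := by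
  intro primer _
  unfold Spec_CheckPrimerContent CheckPrimerContent CheckPrimerContent_alt
  rw [loop_eq, complement_eq]
  simp only [PySem.Str.count_eq, PySem.Str.len_eq, zero_add,
    show ("A".toList) = ['A'] from rfl, show ("C".toList) = ['C'] from rfl,
    show ("T".toList) = ['T'] from rfl, show ("G".toList) = ['G'] from rfl,
    chars_count_single]
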